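-- pv_equiv track=rewrite | github.com/edvisees/sciDP | util.py | read_passages
-- ===== SOURCE A (Python) =====
-- def read_passages(all_passages, is_labeled):
--     str_seqs = []
--     str_seq = []
--     label_seqs = []
--     label_seq = []
--
--     for line in all_passages:
--         lnstrp = line.strip()
--         if lnstrp == "":
--             if len(str_seq) != 0:
--                 str_seqs.append(str_seq)
--                 str_seq = []
--                 label_seqs.append(label_seq)
--                 label_seq = []
--         else:
--             if is_labeled:
--                 clause, label = lnstrp.split("\t")
--                 label_seq.append(label)
--             else:
--                 clause = lnstrp
--             str_seq.append(clause)
--     if len(str_seq) != 0: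
--         str_seqs.append(str_seq)
--         str_seq = []
--         label_seqs.append(label_seq)
--         label_seq = []
--     return str_seqs, label_seqs
-- ===== SOURCE B (Python) =====
-- def read_passages(all_passages, is_labeled):
--     # Phase 1: strip all lines, then group consecutive non-empty ones.
--     groups = []
--     cur = []
--     for s in (line.strip() for line in all_passages):
--         if s:
--             cur.append(s)
--         elif cur:
--             groups.append(cur)
--             cur = []
--     if cur:
--         groups.append(cur)
--     # Phase 2: per group, project out clauses and labels.
--     if is_labeled:
--         str_seqs = [[ln.split("\t")[0] for ln in g] for g in groups]
--         label_seqs = [[ln.split("\t")[1] for ln in g] for g in groups]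
--     else:
--         str_seqs = groups
--         label_seqs = [[] for _ in groups]
--     return str_seqs, label_seqs
-- ===== Notes on version B (the rewrite author's own statement) =====
-- stated objective: alternative
-- what changed: Replaces the single state machine that threads four parallel accumulators through one loop with a two-phase decomposition: first group consecutive non-empty stripped lines, then project clauses/labels out of each group by comprehensions.
-- outside the precondition, e.g. on read_passages(['a\tb\tc'], True): A raises ValueError, B returns ([['a']], [['b']])
import Mathlib
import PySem

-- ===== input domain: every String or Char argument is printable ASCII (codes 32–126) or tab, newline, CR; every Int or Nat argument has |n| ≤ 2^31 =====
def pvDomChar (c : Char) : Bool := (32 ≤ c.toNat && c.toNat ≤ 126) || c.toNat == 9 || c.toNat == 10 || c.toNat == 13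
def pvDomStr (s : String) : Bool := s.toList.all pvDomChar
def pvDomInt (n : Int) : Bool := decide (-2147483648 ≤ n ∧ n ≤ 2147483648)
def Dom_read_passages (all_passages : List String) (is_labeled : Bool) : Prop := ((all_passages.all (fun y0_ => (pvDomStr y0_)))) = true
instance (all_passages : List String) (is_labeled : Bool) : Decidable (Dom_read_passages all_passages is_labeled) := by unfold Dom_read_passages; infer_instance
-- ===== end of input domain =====

-- B replaces A's one-pass four-accumulator state machine by a two-phase decomposition
-- (group consecutive non-empty stripped lines, then project clauses/labels per group);
-- same cost, different structure.


-- ===== PORT A =====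
-- s.split("\t") (sep non-empty, so split? is always some; exact)
def pvSplitTab (s : String) : List String := (PySem.Str.split? s "\t").getD []

-- state = (str_seqs, str_seq, label_seqs, label_seq)
def pvStateA : Type := List (List String) × List String × List (List String) × List String

def pvStepA (is_labeled : Bool) (st : pvStateA) (line : String) : pvStateA :=
  let (str_seqs, str_seq, label_seqs, label_seq) := st
  let lnstrp := PySem.Str.strip line
  if lnstrp = "" then
    if str_seq.length ≠ 0 then
      (str_seqs ++ [str_seq], [], label_seqs ++ [label_seq], [])
    else (str_seqs, str_seq, label_seqs, label_seq)
  else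
    if is_labeled then
      -- 'clause, label = lnstrp.split("\t")': Python raises unless exactly 2 parts
      -- (excluded by Pre_); inside Pre_ getD 0/1 are exactly those two parts
      let parts := pvSplitTab lnstrp
      (str_seqs, str_seq ++ [parts.getD 0 ""], label_seqs, label_seq ++ [parts.getD 1 ""])
    else (str_seqs, str_seq ++ [lnstrp], label_seqs, label_seq)

def read_passages (all_passages : List String) (is_labeled : Bool) : List (List String) × List (List String) :=
  let st := all_passages.foldl (pvStepA is_labeled) ([], [], [], [])
  let (str_seqs, str_seq, label_seqs, label_seq) := st
  if str_seq.length ≠ 0 then (str_seqs ++ [str_seq], label_seqs ++ [label_seq])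
  else (str_seqs, label_seqs)

-- ===== PORT B =====
-- grouping state = (groups, cur)
def pvStepB (gc : List (List String) × List String) (s : String) : List (List String) × List String :=
  if s ≠ "" then (gc.1, gc.2 ++ [s])
  else if gc.2 ≠ [] then (gc.1 ++ [gc.2], []) else gc

def read_passages_alt (all_passages : List String) (is_labeled : Bool) : List (List String) × List (List String) :=
  let stripped := all_passages.map PySem.Str.strip
  let gc := stripped.foldl pvStepB ([], [])
  let groups := if gc.2 ≠ [] then gc.1 ++ [gc.2] else gc.1
  if is_labeled then
    (groups.map (fun g => g.map (fun ln => (pvSplitTab ln).getD 0 "")),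
     groups.map (fun g => g.map (fun ln => (pvSplitTab ln).getD 1 "")))
  else
    (groups, groups.map (fun _ => []))

-- ===== PRECONDITION & SPEC =====
-- Pre_ excludes exactly the inputs where A raises: with is_labeled, a non-empty stripped
-- line whose split("\t") does not have exactly 2 parts makes the unpacking raise ValueError.
def Pre_read_passages (all_passages : List String) (is_labeled : Bool) : Prop :=
  is_labeled = true →
    ∀ line ∈ all_passages, PySem.Str.strip line ≠ "" →
      (pvSplitTab (PySem.Str.strip line)).length = 2
instance (all_passages : List String) (is_labeled : Bool) : Decidable (Pre_read_passages all_passages is_labeled) := by unfold Pre_read_passages; infer_instance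

def pvWitness_read_passages : List String × Bool := (["a\tb", "", "c\td"], true)

def Spec_read_passages (all_passages : List String) (is_labeled : Bool) (out : List (List String) × List (List String)) : Prop := out = read_passages_alt all_passages is_labeled
instance (all_passages : List String) (is_labeled : Bool) (out : List (List String) × List (List String)) : Decidable (Spec_read_passages all_passages is_labeled out) := by unfold Spec_read_passages; infer_instance

-- ===== CLAIM (what is proved, stated in full; the proofs are below) =====
def Claim_equal_read_passages : Prop := ∀ (all_passages : List String) (is_labeled : Bool), Dom_read_passages all_passages is_labeled → Pre_read_passages all_passages is_labeled → Spec_read_passages all_passages is_labeled (read_passages all_passages is_labeled)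

-- ===== LEMMAS AND PROOFS =====

-- clause/label projections of a group of stripped lines
def pvCsel (b : Bool) (g : List String) : List String :=
  if b then g.map (fun ln => (pvSplitTab ln).getD 0 "") else g
def pvLsel (b : Bool) (g : List String) : List String :=
  if b then g.map (fun ln => (pvSplitTab ln).getD 1 "") else []

theorem pvCsel_nil (b : Bool) : pvCsel b [] = [] := by cases b <;> simp [pvCsel]
theorem pvLsel_nil (b : Bool) : pvLsel b [] = [] := by cases b <;> simp [pvLsel]
theorem pvCsel_len (b : Bool) (g : List String) : (pvCsel b g).length = g.length := by
  cases b <;> simp [pvCsel]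

theorem pv_key (b : Bool) (lines : List String) (gs : List (List String)) (cur : List String) :
    (let st := lines.foldl (pvStepA b) (gs.map (pvCsel b), pvCsel b cur, gs.map (pvLsel b), pvLsel b cur)
     if st.2.1.length ≠ 0 then (st.1 ++ [st.2.1], st.2.2.1 ++ [st.2.2.2]) else (st.1, st.2.2.1))
    =
    (let gc := (lines.map PySem.Str.strip).foldl pvStepB (gs, cur)
     let groups := if gc.2 ≠ [] then gc.1 ++ [gc.2] else gc.1
     (groups.map (pvCsel b), groups.map (pvLsel b))) := by
  induction lines generalizing gs cur with
  | nil =>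
    by_cases h : cur = []
    · subst h; simp [pvCsel_nil, pvLsel_nil]
    · simp only [List.foldl_nil, List.map_nil]
      have hl : (pvCsel b cur).length ≠ 0 := by
        rw [pvCsel_len]; simpa [List.length_eq_zero_iff] using h
      simp [h, hl]
  | cons line rest ih =>
    simp only [List.foldl_cons, List.map_cons]
    by_cases hs : PySem.Str.strip line = ""
    · by_cases h : cur = []
      · subst h
        have : pvStepA b (gs.map (pvCsel b), pvCsel b [], gs.map (pvLsel b), pvLsel b []) line
            = (gs.map (pvCsel b), pvCsel b [], gs.map (pvLsel b), pvLsel b []) := by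
          simp [pvStepA, hs, pvCsel_nil, pvLsel_nil]
        rw [this]
        have : pvStepB (gs, ([] : List String)) (PySem.Str.strip line) = (gs, []) := by
          simp [pvStepB, hs]
        rw [this]
        exact ih gs []
      · have hl : (pvCsel b cur).length ≠ 0 := by
          rw [pvCsel_len]; simpa [List.length_eq_zero_iff] using h
        have : pvStepA b (gs.map (pvCsel b), pvCsel b cur, gs.map (pvLsel b), pvLsel b cur) line
            = ((gs ++ [cur]).map (pvCsel b), pvCsel b [], (gs ++ [cur]).map (pvLsel b), pvLsel b []) := by
          simp [pvStepA, hs, hl, pvCsel_nil, pvLsel_nil]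
        rw [this]
        have : pvStepB (gs, cur) (PySem.Str.strip line) = (gs ++ [cur], []) := by
          simp [pvStepB, hs, h]
        rw [this]
        exact ih (gs ++ [cur]) []
    · have hA : pvStepA b (gs.map (pvCsel b), pvCsel b cur, gs.map (pvLsel b), pvLsel b cur) line
          = (gs.map (pvCsel b), pvCsel b (cur ++ [PySem.Str.strip line]),
             gs.map (pvLsel b), pvLsel b (cur ++ [PySem.Str.strip line])) := by
        cases b <;> simp [pvStepA, hs, pvCsel, pvLsel]
      rw [hA]
      have hB : pvStepB (gs, cur) (PySem.Str.strip line) = (gs, cur ++ [PySem.Str.strip line]) := by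
        simp [pvStepB, hs]
      rw [hB]
      exact ih gs (cur ++ [PySem.Str.strip line])

-- ===== VERDICT (by name: the statement is the Claim_ definition above) =====
theorem read_passages_spec : Claim_equal_read_passages := by
  intro all_passages is_labeled _ _
  unfold Spec_read_passages read_passages read_passages_alt
  have h := pv_key is_labeled all_passages [] []
  simp only [List.map_nil, pvCsel_nil, pvLsel_nil] at h
  rcases hst : List.foldl (pvStepA is_labeled) ([], [], [], []) all_passages with ⟨ss, sq, ls, lq⟩
  rw [hst] at h
  have hc : pvCsel false = fun g => g := funext fun g => by simp [pvCsel]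
  have hl2 : pvLsel false = fun _ => ([] : List String) := funext fun g => by simp [pvLsel]
  cases is_labeled <;> simp_all [pvCsel, pvLsel, List.map_const']
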